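-- pv_equiv track=rewrite | github.com/m-funky/ProjectEuler | python/p089.py | saved_chars_num_by_minimal_form
-- ===== SOURCE A (Python) =====
-- def saved_chars_num_by_minimal_form(roman):
--
--     prev_c = ""
--     prev_diffrent_c = ""
--     c_num = 0
--     saved_num = 0
--     for c in roman:
--         if c == "M":
--             continue
--         elif c == prev_c:
--             c_num += 1
--             if c_num == 4:
--                 if prev_diffrent_c == "D" and prev_c == "C":
--                     saved_num += 3 # e.g) DCCC -> CD, 5 - 2 = 3
--                 elif prev_diffrent_c == "L" and prev_c == "X":
--                     saved_num += 3 # e.g) LXXX -> XL, 5 - 2 = 3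
--                 elif prev_diffrent_c == "V" and prev_c == "I":
--                     saved_num += 3 # e.g) VIII -> IV, 5 - 2 = 3
--                 else:
--                     saved_num += 2 # e.g) IIII -> IV, 4 - 2 = 2
--         else:
--             prev_diffrent_c = prev_c
--             prev_c = c
--             c_num = 1
--
--
--     return saved_num
-- ===== SOURCE B (Python) =====
-- def saved_chars_num_by_minimal_form(roman):
--     # run-based rewrite: drop the 'M's, then walk maximal runs of equal chars
--     s = roman.replace("M", "")
--     saved = 0
--     prev = ""
--     i = 0
--     while i < len(s):
--         j = i
--         while j < len(s) and s[j] == s[i]: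
--             j += 1
--         if j - i >= 4:
--             saved += 3 if (prev, s[i]) in (("D", "C"), ("L", "X"), ("V", "I")) else 2
--         prev = s[i]
--         i = j
--     return saved
-- ===== Notes on version B (the rewrite author's own statement) =====
-- stated objective: alternative
-- what changed: B strips the 'M's up front and walks maximal runs of equal characters (two-pointer run extraction), adding the saving once per run of length >= 4 based on the previous run's character, instead of A's single character-by-character scan with prev_c/prev_diffrent_c/c_num counter state.
import Mathlib
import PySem

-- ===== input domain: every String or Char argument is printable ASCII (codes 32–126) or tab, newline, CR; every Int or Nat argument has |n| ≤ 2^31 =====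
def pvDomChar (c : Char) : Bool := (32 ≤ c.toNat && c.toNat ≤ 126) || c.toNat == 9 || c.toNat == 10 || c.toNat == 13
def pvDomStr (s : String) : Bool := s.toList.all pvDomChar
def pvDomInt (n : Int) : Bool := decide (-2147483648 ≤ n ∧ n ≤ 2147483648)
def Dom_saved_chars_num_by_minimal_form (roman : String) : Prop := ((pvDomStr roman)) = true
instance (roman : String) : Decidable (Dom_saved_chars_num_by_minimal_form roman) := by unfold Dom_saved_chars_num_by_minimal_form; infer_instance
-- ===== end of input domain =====

-- B replaces A's stateful character-by-character counter scan by a strip-the-M's-then-walk-maximal-runs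
-- decomposition (objective: alternative/simpler structure, same cost).

-- a Python 1-character string
def toS (c : Char) : String := String.ofList [c]

-- ===== PORT A =====
-- the if/elif/elif/else chain that A adds to saved_num when c_num hits 4
def bonusA (d p : String) : Int :=
  if d = "D" ∧ p = "C" then 3
  else if d = "L" ∧ p = "X" then 3
  else if d = "V" ∧ p = "I" then 3
  else 2

-- one iteration of A's for-loop; state = (prev_c, prev_diffrent_c, c_num, saved_num)
def stepA : String × String × Int × Int → Char → String × String × Int × Int
  | (p, d, n, s), c =>
    if toS c = "M" then (p, d, n, s)
    else if toS c = p then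
      if n + 1 = 4 then (p, d, n + 1, s + bonusA d p) else (p, d, n + 1, s)
    else (toS c, p, 1, s)

def saved_chars_num_by_minimal_form (roman : String) : Int :=
  (roman.toList.foldl stepA ("", "", 0, 0)).2.2.2

-- ===== PORT B =====
-- B's outer while loop: consume one maximal run per step, remembering the previous run's char
def goB : List Char → String → Int
  | [], _ => 0
  | c :: rest, prev =>
    (if (4 : Int) ≤ 1 + (rest.takeWhile (· == c)).length then
       (if (prev = "D" ∧ toS c = "C") ∨ (prev = "L" ∧ toS c = "X") ∨ (prev = "V" ∧ toS c = "I")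
        then 3 else 2)
     else 0)
    + goB (rest.dropWhile (· == c)) (toS c)
termination_by l _ => l.length
decreasing_by
  have := List.length_dropWhile_le (· == c) rest
  simp only [List.length_cons]
  omega

def saved_chars_num_by_minimal_form_alt (roman : String) : Int :=
  goB (roman.toList.filter (fun c => c != 'M')) ""

-- ===== PRECONDITION & SPEC =====
def Spec_saved_chars_num_by_minimal_form (roman : String) (out : Int) : Prop := out = saved_chars_num_by_minimal_form_alt roman
instance (roman : String) (out : Int) : Decidable (Spec_saved_chars_num_by_minimal_form roman out) := by unfold Spec_saved_chars_num_by_minimal_form; infer_instance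

-- ===== CLAIM (what is proved, stated in full; the proofs are below) =====
def Claim_equal_saved_chars_num_by_minimal_form : Prop := ∀ (roman : String), Dom_saved_chars_num_by_minimal_form roman → Spec_saved_chars_num_by_minimal_form roman (saved_chars_num_by_minimal_form roman)

-- ===== LEMMAS AND PROOFS =====

lemma toS_inj {a b : Char} : toS a = toS b ↔ a = b := by
  constructor
  · intro h
    have := congrArg String.toList h
    simpa [toS] using this
  · intro h; rw [h]

lemma toS_ne_empty (c : Char) : toS c ≠ "" := by
  intro h
  have := congrArg String.toList h
  simp [toS] at this

lemma toS_eq_M_iff (c : Char) : toS c = "M" ↔ c = 'M' := by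
  rw [show "M" = toS 'M' from by decide]
  exact toS_inj

-- A's loop skips 'M' without touching the state: folding over l equals folding over l with the M's removed
lemma skipM (l : List Char) : ∀ st, l.foldl stepA st = (l.filter (fun c => c != 'M')).foldl stepA st := by
  induction l with
  | nil => intro _; rfl
  | cons c t ih =>
    intro st
    by_cases hc : c = 'M'
    · subst hc
      have hst : stepA st 'M' = st := by
        obtain ⟨p, d, n, s⟩ := st
        simp [stepA, show toS 'M' = "M" from by decide]
      rw [List.foldl_cons, hst, ih, show List.filter (fun c => c != 'M') ('M' :: t) = t.filter (fun c => c != 'M') from by simp]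
    · rw [show List.filter (fun c => c != 'M') (c :: t) = c :: t.filter (fun c => c != 'M') from by simp [hc],
          List.foldl_cons, List.foldl_cons, ih]

-- A's loop across k further copies of the current run's char: c_num advances by k and saved_num
-- picks up the bonus exactly if c_num passes 4 inside the run
lemma runA (c : Char) (hc : c ≠ 'M') (d : String) :
    ∀ (k : Nat) (n s : Int),
      (List.replicate k c).foldl stepA (toS c, d, n, s)
        = (toS c, d, n + k, s + (if n ≤ 3 ∧ 4 ≤ n + k then bonusA d (toS c) else 0)) := by
  intro k
  induction k with
  | zero =>
    intro n s
    simp only [List.replicate, List.foldl_nil, Nat.cast_zero, add_zero]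
    rw [if_neg (by omega : ¬((n : Int) ≤ 3 ∧ 4 ≤ n)), add_zero]
  | succ k ih =>
    intro n s
    rw [List.replicate_succ, List.foldl_cons]
    have hM : toS c ≠ "M" := fun h => hc ((toS_eq_M_iff c).mp h)
    by_cases h4 : n + 1 = 4
    · rw [show stepA (toS c, d, n, s) c = (toS c, d, n + 1, s + bonusA d (toS c)) from by
        simp [stepA, hM, h4]]
      rw [ih]
      simp only [Prod.mk.injEq, true_and]
      refine ⟨by push_cast; omega, ?_⟩
      split_ifs <;> push_cast at * <;> omega
    · rw [show stepA (toS c, d, n, s) c = (toS c, d, n + 1, s) from by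
        simp [stepA, hM, h4]]
      rw [ih]
      simp only [Prod.mk.injEq, true_and]
      refine ⟨by push_cast; omega, ?_⟩
      split_ifs <;> push_cast at * <;> omega

-- the head of dropWhile (· == c) is not c
lemma head_dropWhile (c : Char) (l : List Char) :
    ∀ x, (l.dropWhile (· == c)).head? = some x → x ≠ c := by
  induction l with
  | nil => simp [List.dropWhile]
  | cons a t ih =>
    intro x h
    rw [List.dropWhile_cons] at h
    split at h
    · exact ih x h
    · next hb =>
      simp only [List.head?_cons, Option.some.injEq] at h
      subst h
      simpa using hb

-- B's if with the tuple-membership test computes the same value as A's if/elif chain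
lemma bonus_eq (d p : String) :
    bonusA d p
      = (if (d = "D" ∧ p = "C") ∨ (d = "L" ∧ p = "X") ∨ (d = "V" ∧ p = "I") then 3 else 2) := by
  unfold bonusA
  split_ifs <;> tauto

-- main invariant: started at a run boundary (the head differs from prev_c), A's scan of the rest of
-- the M-free string adds exactly B's run-walk total
lemma mainL (N : Nat) :
    ∀ (l : List Char), l.length ≤ N →
      ∀ (p d : String) (n s : Int), 'M' ∉ l → (∀ x, l.head? = some x → toS x ≠ p) →
        (l.foldl stepA (p, d, n, s)).2.2.2 = s + goB l p := by
  induction N with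
  | zero =>
    intro l hl p d n s _ _
    cases l with
    | nil => simp [goB]
    | cons a t => simp at hl
  | succ N ih =>
    intro l hl p d n s hM hp
    match l with
    | [] => simp [goB]
    | c :: rest =>
      have hc : c ≠ 'M' := by intro h; exact hM (h ▸ List.mem_cons_self)
      have hcp : toS c ≠ p := hp c rfl
      have hMs : toS c ≠ "M" := fun h => hc ((toS_eq_M_iff c).mp h)
      rw [List.foldl_cons,
          show stepA (p, d, n, s) c = (toS c, p, 1, s) from by simp [stepA, hMs, hcp]]
      have hrep : rest.takeWhile (· == c) = List.replicate (rest.takeWhile (· == c)).length c := by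
        rw [List.eq_replicate_iff]
        exact ⟨rfl, fun b hb => by have := List.mem_takeWhile_imp hb; simpa using this⟩
      have hsplit : rest = rest.takeWhile (· == c) ++ rest.dropWhile (· == c) :=
        (List.takeWhile_append_dropWhile).symm
      conv_lhs => rw [hsplit]
      rw [List.foldl_append, hrep, runA c hc p]
      have hMr : 'M' ∉ rest.dropWhile (· == c) := fun h =>
        hM (List.mem_cons_of_mem _ ((List.dropWhile_sublist _).subset h))
      have hpr : ∀ x, (rest.dropWhile (· == c)).head? = some x → toS x ≠ toS c := by
        intro x hx
        rw [toS_inj.ne]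
        exact head_dropWhile c rest x hx
      have hlen : (rest.dropWhile (· == c)).length ≤ N := by
        have := List.length_dropWhile_le (· == c) rest
        simp only [List.length_cons] at hl
        omega
      rw [ih _ hlen (toS c) p _ _ hMr hpr]
      rw [show goB (c :: rest) p
            = (if (4 : Int) ≤ 1 + (rest.takeWhile (· == c)).length then
                 (if (p = "D" ∧ toS c = "C") ∨ (p = "L" ∧ toS c = "X") ∨ (p = "V" ∧ toS c = "I")
                  then 3 else 2)
               else 0) + goB (rest.dropWhile (· == c)) (toS c) from by rw [goB]]
      rw [← bonus_eq]
      by_cases h : (4 : Int) ≤ 1 + ((rest.takeWhile (· == c)).length : Int)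
      · rw [if_pos h, if_pos ⟨by norm_num, h⟩]; ring
      · rw [if_neg h, if_neg (fun hh => h hh.2)]; ring

-- ===== VERDICT (by name: the statement is the Claim_ definition above) =====
theorem saved_chars_num_by_minimal_form_spec : Claim_equal_saved_chars_num_by_minimal_form := by
  intro roman _
  unfold Spec_saved_chars_num_by_minimal_form saved_chars_num_by_minimal_form saved_chars_num_by_minimal_form_alt
  rw [skipM]
  rw [mainL (roman.toList.filter (fun c => c != 'M')).length _ le_rfl "" "" 0 0
        (by simp) (fun x _ => toS_ne_empty x)]
  simp
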